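-- pv_equiv track=rewrite | github.com/xiaohuanlin/Algorithms | Leetcode/2110. Number of Smooth Descent Periods of a Stock.py | getDescentPeriods
-- ===== SOURCE A (Python) =====
-- from typing import List
--
-- def getDescentPeriods(prices: List[int]) -> int:
--     target = None
--     count = 0
--     res = 0
--     for price in prices:
--         if price == target:
--             count += 1
--             target -= 1
--         else:
--             res += (1 + count) * count // 2
--             target = price - 1
--             count = 1
--
--     res += (1 + count) * count // 2
--     return res
-- ===== SOURCE B (Python) =====
-- def getDescentPeriods(prices):
--     if not prices:
--         return 0
--     res = 1
--     cur = 1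
--     for i in range(1, len(prices)):
--         if prices[i] == prices[i - 1] - 1:
--             cur += 1
--         else:
--             cur = 1
--         res += cur
--     return res
-- ===== Notes on version B (the rewrite author's own statement) =====
-- stated objective: idiomatic
-- what changed: B adds each element's contribution (the current run length) incrementally in one pass, instead of A's per-run triangular-number closed form with a sentinel target and a trailing flush after the loop.
import Mathlib
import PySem

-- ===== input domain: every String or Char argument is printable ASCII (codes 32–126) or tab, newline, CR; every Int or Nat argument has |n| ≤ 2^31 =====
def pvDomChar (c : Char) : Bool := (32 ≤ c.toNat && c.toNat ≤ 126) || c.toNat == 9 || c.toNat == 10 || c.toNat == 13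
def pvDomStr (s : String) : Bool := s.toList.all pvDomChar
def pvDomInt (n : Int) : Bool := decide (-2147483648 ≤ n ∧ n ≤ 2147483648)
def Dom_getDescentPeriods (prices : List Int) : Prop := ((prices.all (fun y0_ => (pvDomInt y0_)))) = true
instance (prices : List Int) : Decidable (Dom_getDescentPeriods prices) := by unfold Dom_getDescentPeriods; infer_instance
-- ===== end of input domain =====

-- B replaces A's per-run triangular-number flush (sentinel target, trailing add) by the
-- idiomatic one-pass incremental count: add the current run length for every element.

-- ===== PORT A =====
-- (1 + count) * count // 2, A's triangular-number expression
def pvTri (count : Int) : Int := PySem.Int.floordiv ((1 + count) * count) 2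

-- the loop of A: state (target, count, res); after the loop A flushes the last run
def pvALoop : List Int → Option Int → Int → Int → Int
  | [], _, count, res => res + pvTri count
  | price :: rest, target, count, res =>
      if some price = target then
        pvALoop rest (target.map (· - 1)) (count + 1) res
      else
        pvALoop rest (some (price - 1)) 1 (res + pvTri count)

def getDescentPeriods (prices : List Int) : Int := pvALoop prices none 0 0

-- ===== PORT B =====
-- the loop of B: prev = prices[i-1], cur = current run length, res = running total
def pvBLoop : List Int → Int → Int → Int → Int
  | [], _, _, res => res
  | p :: rest, prev, cur, res =>
      let cur' := if p = prev - 1 then cur + 1 else 1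
      pvBLoop rest p cur' (res + cur')

def getDescentPeriods_alt (prices : List Int) : Int :=
  match prices with
  | [] => 0
  | h :: t => pvBLoop t h 1 1

-- ===== PRECONDITION & SPEC =====
def Spec_getDescentPeriods (prices : List Int) (out : Int) : Prop := out = getDescentPeriods_alt prices
instance (prices : List Int) (out : Int) : Decidable (Spec_getDescentPeriods prices out) := by unfold Spec_getDescentPeriods; infer_instance

-- ===== CLAIM (what is proved, stated in full; the proofs are below) =====
def Claim_equal_getDescentPeriods : Prop := ∀ (prices : List Int), Dom_getDescentPeriods prices → Spec_getDescentPeriods prices (getDescentPeriods prices)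

-- ===== LEMMAS AND PROOFS =====

-- (1+c)*c is always even, so the floor division is exact and the triangle grows by c+1
theorem pvTri_succ (c : Int) : pvTri (c + 1) = pvTri c + (c + 1) := by
  unfold pvTri
  have h1 : (1 + (c + 1)) * (c + 1) = (1 + c) * c + (c + 1) * 2 := by ring
  rw [h1, PySem.Int.floordiv_eq_ediv_of_pos (by norm_num),
      PySem.Int.floordiv_eq_ediv_of_pos (by norm_num), Int.add_mul_ediv_right _ _ (by norm_num)]

theorem pvTri_one : pvTri 1 = 1 := by decide

-- loop invariant: A's pending triangle folded into B's running total
theorem pvLoop_eq (l : List Int) : ∀ (prev c r : Int),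
    pvALoop l (some (prev - 1)) c r = pvBLoop l prev c (r + pvTri c) := by
  induction l with
  | nil => intro prev c r; simp [pvALoop, pvBLoop]
  | cons p rest ih =>
      intro prev c r
      simp only [pvALoop, pvBLoop, Option.map_some]
      by_cases h : p = prev - 1
      · rw [if_pos h, if_pos (show some p = some (prev - 1) from by rw [h])]
        subst h
        rw [ih, pvTri_succ]; ring_nf
      · rw [if_neg h, if_neg (fun hc => h (Option.some.inj hc))]
        rw [ih, pvTri_one]

theorem getDescentPeriods_spec : Claim_equal_getDescentPeriods := by
  intro prices _
  unfold Spec_getDescentPeriods getDescentPeriods getDescentPeriods_alt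
  cases prices with
  | nil => decide
  | cons h t =>
      simp only [pvALoop, reduceCtorEq]
      rw [pvLoop_eq]
      norm_num [pvTri]
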